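-- pv_equiv track=rewrite | github.com/OKA-Rechnungen/okar-static | scripts/generate_update_rdf.py | build_triples
-- ===== SOURCE A (Python) =====
-- from typing import Dict, Iterable, List, Set, Tuple
--
-- def build_triples(
--     masters_tifs: Dict[Tuple[str, str], str],
--     derivates_tifs: Dict[Tuple[str, str], str],
--     masters_cols: Set[str],
--     derivates_cols: Set[str],
--     teis: Set[str],
-- ) -> Tuple[List[Tuple[str, str]], List[Tuple[str, str]], List[Tuple[str, str]]]:
--     """Build predicate-object pairs grouped by subject category.
--
--     Returns:
--       - tif_links: list of (master_tif_uri, derivate_tif_uri)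
--       - col_to_tei: list of (masters_collection_uri, tei_uri)
--       - tei_to_cols: list of (tei_uri, collection_uri)
--     """
--
--     tif_links: List[Tuple[str, str]] = []
--     for key, master_uri in masters_tifs.items():
--         der_uri = derivates_tifs.get(key)
--         if der_uri:
--             tif_links.append((master_uri, der_uri))
--
--     col_to_tei: List[Tuple[str, str]] = []
--     tei_to_cols: List[Tuple[str, str]] = []
--
--     vols = sorted(set(teis) | set(masters_cols) | set(derivates_cols))
--     for vol in vols:
--         tei_uri = f"https://id.acdh.oeaw.ac.at/okar/{vol}.xml"
--         masters_col_uri = f"https://id.acdh.oeaw.ac.at/okar/masters/{vol}"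
--         derivates_col_uri = f"https://id.acdh.oeaw.ac.at/okar/derivates/{vol}"
--
--         if vol in masters_cols and vol in teis:
--             col_to_tei.append((masters_col_uri, tei_uri))
--
--         if vol in teis:
--             if vol in masters_cols:
--                 tei_to_cols.append((tei_uri, masters_col_uri))
--             if vol in derivates_cols:
--                 tei_to_cols.append((tei_uri, derivates_col_uri))
--
--     # stable order
--     tif_links.sort()
--     col_to_tei.sort()
--     tei_to_cols.sort()
--
--     return tif_links, col_to_tei, tei_to_cols
-- ===== SOURCE B (Python) =====
-- from typing import Dict, List, Set, Tuple
--
--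
-- def build_triples(
--     masters_tifs: Dict[Tuple[str, str], str],
--     derivates_tifs: Dict[Tuple[str, str], str],
--     masters_cols: Set[str],
--     derivates_cols: Set[str],
--     teis: Set[str],
-- ) -> Tuple[List[Tuple[str, str]], List[Tuple[str, str]], List[Tuple[str, str]]]:
--     base = "https://id.acdh.oeaw.ac.at/okar/"
--
--     # tif_links: merge-join the two dicts over their key-sorted item lists (two pointers),
--     # instead of probing one dict while iterating the other.
--     ma = sorted(masters_tifs.items(), key=lambda kv: kv[0])
--     da = sorted(derivates_tifs.items(), key=lambda kv: kv[0])
--     tif_links: List[Tuple[str, str]] = []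
--     i = j = 0
--     nm, nd = len(ma), len(da)
--     while i < nm and j < nd:
--         km, vm = ma[i]
--         kd, vd = da[j]
--         if km < kd:
--             i += 1
--         elif kd < km:
--             j += 1
--         else:
--             if vd:
--                 tif_links.append((vm, vd))
--             i += 1
--             j += 1
--     tif_links.sort()
--
--     def inter(a: List[str], b: List[str]) -> List[str]:
--         # sorted-list intersection by a two-pointer merge walk (no membership tests)
--         out: List[str] = []
--         i = j = 0
--         na, nb = len(a), len(b)
--         while i < na and j < nb:
--             if a[i] < b[j]:
--                 i += 1
--             elif b[j] < a[i]:
--                 j += 1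
--             else:
--                 out.append(a[i])
--                 i += 1
--                 j += 1
--         return out
--
--     ms = sorted(set(masters_cols))
--     ds = sorted(set(derivates_cols))
--     ts = sorted(set(teis))
--
--     col_to_tei = sorted(
--         (f"{base}masters/{v}", f"{base}{v}.xml") for v in inter(ms, ts)
--     )
--     tei_to_cols = sorted(
--         [(f"{base}{v}.xml", f"{base}masters/{v}") for v in inter(ts, ms)]
--         + [(f"{base}{v}.xml", f"{base}derivates/{v}") for v in inter(ts, ds)]
--     )
--     return tif_links, col_to_tei, tei_to_cols
-- ===== Notes on version B (the rewrite author's own statement) =====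
-- stated objective: alternative
-- what changed: Replaces A's hash-style probing (dict .get inside the items loop, membership tests inside a loop over the sorted union of the three sets) by sort-then-merge joins: the two dicts are key-sorted and merge-joined with two pointers for tif_links, and the collection/TEI pair lists are built from two-pointer merge intersections of the individually sorted sets.
import Mathlib
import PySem

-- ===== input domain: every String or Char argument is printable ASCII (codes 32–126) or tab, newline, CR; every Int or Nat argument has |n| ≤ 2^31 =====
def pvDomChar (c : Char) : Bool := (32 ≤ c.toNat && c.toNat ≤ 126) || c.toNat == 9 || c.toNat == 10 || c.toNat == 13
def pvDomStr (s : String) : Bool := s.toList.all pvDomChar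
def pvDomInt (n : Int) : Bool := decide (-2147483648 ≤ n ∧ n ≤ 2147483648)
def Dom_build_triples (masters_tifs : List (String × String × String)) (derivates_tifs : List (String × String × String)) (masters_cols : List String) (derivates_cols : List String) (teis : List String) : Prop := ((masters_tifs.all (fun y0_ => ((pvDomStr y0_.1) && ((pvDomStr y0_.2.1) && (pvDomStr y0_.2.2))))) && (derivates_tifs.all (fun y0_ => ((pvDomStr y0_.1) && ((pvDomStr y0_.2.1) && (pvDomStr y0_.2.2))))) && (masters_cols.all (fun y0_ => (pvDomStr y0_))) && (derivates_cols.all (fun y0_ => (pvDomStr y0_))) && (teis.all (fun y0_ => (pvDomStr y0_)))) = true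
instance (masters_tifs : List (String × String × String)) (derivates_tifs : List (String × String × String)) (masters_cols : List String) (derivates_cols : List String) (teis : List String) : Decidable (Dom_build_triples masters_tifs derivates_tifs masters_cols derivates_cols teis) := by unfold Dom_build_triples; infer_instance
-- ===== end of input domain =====

-- B replaces A's hash-style probing (dict .get inside the items loop, membership tests inside
-- a loop over the sorted union) by sort-then-merge: key-sorted item lists merge-joined with two
-- pointers, and two-pointer merge intersections of the sorted sets (objective: alternative).


-- Shared helpers (the f-string URI builders and the dict/sort encodings, used verbatim by both ports).
def pvUriTei (v : String) : String := "https://id.acdh.oeaw.ac.at/okar/" ++ v ++ ".xml"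
def pvUriMasters (v : String) : String := "https://id.acdh.oeaw.ac.at/okar/masters/" ++ v
def pvUriDerivates (v : String) : String := "https://id.acdh.oeaw.ac.at/okar/derivates/" ++ v
-- A dict[tuple[str,str], str] parameter arrives as List (String × String × String);
-- PySem.Dict.ofList rebuilds the Python dict (duplicate keys: overwrite in place, as dict(...) does).
def pvDict (l : List (String × String × String)) : PySem.Dict (String × String) String :=
  PySem.Dict.ofList (l.map (fun e => ((e.1, e.2.1), e.2.2)))
-- list.sort() / sorted() on pairs of strings: Python's lexicographic tuple order.
def pvSort (l : List (String × String)) : List (String × String) :=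
  PySem.List.sorted2 l (·.1) (·.2)

-- ===== PORT A =====
def build_triples (masters_tifs : List (String × String × String)) (derivates_tifs : List (String × String × String)) (masters_cols : List String) (derivates_cols : List String) (teis : List String) : (List (String × String)) × (List (String × String)) × (List (String × String)) :=
  let m := pvDict masters_tifs
  let d := pvDict derivates_tifs
  -- for key, master_uri in masters_tifs.items(): der_uri = derivates_tifs.get(key); if der_uri: append
  let tif_links : List (String × String) := m.items.foldl (fun acc kv =>
      match d.get? kv.1 with
      | some der => if der ≠ "" then acc ++ [(kv.2, der)] else acc
      | none => acc) []
  -- vols = sorted(set(teis) | set(masters_cols) | set(derivates_cols))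
  let vols := PySem.List.sorted
      (PySem.Set.union (PySem.Set.union (PySem.Set.ofList teis) masters_cols) derivates_cols)
      (fun x => x)
  let p := vols.foldl (fun (acc : List (String × String) × List (String × String)) vol =>
      (if masters_cols.contains vol && teis.contains vol then
         acc.1 ++ [(pvUriMasters vol, pvUriTei vol)] else acc.1,
       if teis.contains vol then
         (let t1 := if masters_cols.contains vol then
             acc.2 ++ [(pvUriTei vol, pvUriMasters vol)] else acc.2
          if derivates_cols.contains vol then
            t1 ++ [(pvUriTei vol, pvUriDerivates vol)] else t1)
       else acc.2)) ([], [])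
  (pvSort tif_links, pvSort p.1, pvSort p.2)

-- ===== PORT B =====
-- the two-pointer merge join over the key-sorted item lists (B's while loop; tuple keys
-- compared in Python's lexicographic order = toLex on String × String)
def pvJoinMerge : List ((String × String) × String) → List ((String × String) × String) → List (String × String)
  | [], _ => []
  | _ :: _, [] => []
  | x :: xs, y :: ys =>
    if toLex x.1 < toLex y.1 then pvJoinMerge xs (y :: ys)
    else if toLex y.1 < toLex x.1 then pvJoinMerge (x :: xs) ys
    else (if y.2 ≠ "" then [(x.2, y.2)] else []) ++ pvJoinMerge xs ys
  termination_by a b => a.length + b.length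

-- B's inter(a, b): two-pointer merge walk over two sorted string lists
def pvInterMerge : List String → List String → List String
  | [], _ => []
  | _ :: _, [] => []
  | x :: xs, y :: ys =>
    if x < y then pvInterMerge xs (y :: ys)
    else if y < x then pvInterMerge (x :: xs) ys
    else x :: pvInterMerge xs ys
  termination_by a b => a.length + b.length

def build_triples_alt (masters_tifs : List (String × String × String)) (derivates_tifs : List (String × String × String)) (masters_cols : List String) (derivates_cols : List String) (teis : List String) : (List (String × String)) × (List (String × String)) × (List (String × String)) :=
  let m := pvDict masters_tifs
  let d := pvDict derivates_tifs
  -- ma/da = sorted(…​.items(), key=lambda kv: kv[0]); tuple key ported as toLex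
  let ma := PySem.List.sorted m.items (fun kv => toLex kv.1)
  let da := PySem.List.sorted d.items (fun kv => toLex kv.1)
  let tif_links := pvSort (pvJoinMerge ma da)
  -- ms/ds/ts = sorted(set(…))
  let ms := PySem.List.sorted (PySem.Set.ofList masters_cols) (fun x => x)
  let ds := PySem.List.sorted (PySem.Set.ofList derivates_cols) (fun x => x)
  let ts := PySem.List.sorted (PySem.Set.ofList teis) (fun x => x)
  let col_to_tei := pvSort
      ((pvInterMerge ms ts).map (fun v => (pvUriMasters v, pvUriTei v)))
  let tei_to_cols := pvSort
      (((pvInterMerge ts ms).map (fun v => (pvUriTei v, pvUriMasters v))) ++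
       ((pvInterMerge ts ds).map (fun v => (pvUriTei v, pvUriDerivates v))))
  (tif_links, col_to_tei, tei_to_cols)

-- ===== PRECONDITION & SPEC =====
def Spec_build_triples (masters_tifs : List (String × String × String)) (derivates_tifs : List (String × String × String)) (masters_cols : List String) (derivates_cols : List String) (teis : List String) (out : (List (String × String)) × (List (String × String)) × (List (String × String))) : Prop := out = build_triples_alt masters_tifs derivates_tifs masters_cols derivates_cols teis
instance (masters_tifs : List (String × String × String)) (derivates_tifs : List (String × String × String)) (masters_cols : List String) (derivates_cols : List String) (teis : List String) (out : (List (String × String)) × (List (String × String)) × (List (String × String))) : Decidable (Spec_build_triples masters_tifs derivates_tifs masters_cols derivates_cols teis out) := by unfold Spec_build_triples; infer_instance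

-- ===== CLAIM (what is proved, stated in full; the proofs are below) =====
def Claim_equal_build_triples : Prop := ∀ (masters_tifs : List (String × String × String)) (derivates_tifs : List (String × String × String)) (masters_cols : List String) (derivates_cols : List String) (teis : List String), Dom_build_triples masters_tifs derivates_tifs masters_cols derivates_cols teis → Spec_build_triples masters_tifs derivates_tifs masters_cols derivates_cols teis (build_triples masters_tifs derivates_tifs masters_cols derivates_cols teis)

-- ===== LEMMAS AND PROOFS =====

-- pvSort is insertion sort by the lexicographic order on pairs: permutations sort equal.
lemma pvSort_eq_sorted_toLex (l : List (String × String)) :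
    pvSort l = PySem.List.sorted l (fun p => (toLex p : Lex (String × String))) := by
  have hb : (fun (a b : String × String) =>
        (decide (a.1 < b.1) || (!decide (b.1 < a.1) && decide (a.2 < b.2))))
      = fun (a b : String × String) =>
        decide ((toLex a : Lex (String × String)) < toLex b) := by
    funext a b
    rcases lt_trichotomy a.1 b.1 with h | h | h
    · simp [Prod.Lex.lt_iff, h]
    · simp [Prod.Lex.lt_iff, h]
    · simp [Prod.Lex.lt_iff, h, lt_asymm h, ne_of_gt h]
  simp only [pvSort, PySem.List.sorted2, PySem.List.sorted, if_neg (by simp : ¬ (false = true))]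
  rw [hb]

lemma pvSort_perm_eq {l1 l2 : List (String × String)} (h : l1.Perm l2) :
    pvSort l1 = pvSort l2 := by
  rw [pvSort_eq_sorted_toLex, pvSort_eq_sorted_toLex]
  exact PySem.List.sorted_eq_sorted_of_perm _ _ _ (fun a b hab => by simpa using hab) h

lemma nodup_keys_pvDict (l : List (String × String × String)) : (pvDict l).keys.Nodup := by
  unfold pvDict PySem.Dict.ofList PySem.Dict.update
  exact PySem.Dict.nodup_keys_foldl_insert_key
    (l.map (fun e => ((e.1, e.2.1), e.2.2))) Prod.fst
    (fun _ p => p.2) PySem.Dict.empty List.nodup_nil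

-- first-match lookup (= dict.get(k, "")) expressed on a raw item list
def pvLookup (l : List ((String × String) × String)) (k : String × String) : String :=
  ((l.find? (fun p => p.1 == k)).map (·.2)).getD ""

lemma find?_of_mem_nodup {κ ν : Type} [BEq κ] [LawfulBEq κ] {l : List (κ × ν)} {kv : κ × ν}
    (h : (l.map Prod.fst).Nodup) (hm : kv ∈ l) :
    l.find? (fun p => p.1 == kv.1) = some kv := by
  induction l with
  | nil => cases hm
  | cons a t ih =>
    rcases List.mem_cons.mp hm with rfl | hmt
    · rw [List.find?_cons_of_pos (by simp)]
    · have hne : a.1 ≠ kv.1 := by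
        intro he
        exact (List.nodup_cons.mp h).1 (he ▸ List.mem_map_of_mem hmt)
      rw [List.find?_cons_of_neg (by simpa using hne)]
      exact ih (List.nodup_cons.mp h).2 hmt

-- first-match lookup is invariant under permutation when keys are nodup
lemma pvLookup_perm {l1 l2 : List ((String × String) × String)}
    (hp : l1.Perm l2) (hnd : (l1.map Prod.fst).Nodup) (k : String × String) :
    pvLookup l1 k = pvLookup l2 k := by
  have hnd2 : (l2.map Prod.fst).Nodup := (hp.map Prod.fst).nodup_iff.mp hnd
  unfold pvLookup
  by_cases hk : ∃ v, (k, v) ∈ l1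
  · obtain ⟨v, hv⟩ := hk
    rw [find?_of_mem_nodup hnd hv, find?_of_mem_nodup hnd2 (hp.mem_iff.mp hv)]
  · have h1 : l1.find? (fun p => p.1 == k) = none := by
      rw [List.find?_eq_none]
      intro p hp1 hpk
      exact hk ⟨p.2, by rwa [show p = (k, p.2) from Prod.ext (by simpa using hpk) rfl] at hp1⟩
    have h2 : l2.find? (fun p => p.1 == k) = none := by
      rw [List.find?_eq_none]
      intro p hp2 hpk
      exact hk ⟨p.2, by
        rw [show p = (k, p.2) from Prod.ext (by simpa using hpk) rfl] at hp2
        exact hp.mem_iff.mpr hp2⟩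
    rw [h1, h2]

lemma pvLookup_cons_of_ne {y : (String × String) × String} {ys : List ((String × String) × String)}
    {k : String × String} (h : y.1 ≠ k) : pvLookup (y :: ys) k = pvLookup ys k := by
  simp [pvLookup, h]

-- ≤-sorted with nodup projections is <-sorted
lemma pairwise_lt_of_le_nodup {α κ : Type} [LinearOrder κ] {l : List α} {f : α → κ}
    (hle : l.Pairwise (fun a b => f a ≤ f b)) (hnd : (l.map f).Nodup) :
    l.Pairwise (fun a b => f a < f b) :=
  (hle.and (List.pairwise_map.mp hnd)).imp (fun h => lt_of_le_of_ne h.1 h.2)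

-- ≤-sorted with nodup projections is <-sorted
-- merge join over key-sorted nodup-key lists = filter-and-lookup over the left list
lemma pvJoinMerge_eq (ma da : List ((String × String) × String))
    (hma : ma.Pairwise (fun u v => toLex u.1 < toLex v.1))
    (hda : da.Pairwise (fun u v => toLex u.1 < toLex v.1)) :
    pvJoinMerge ma da
      = (ma.filter (fun kv => pvLookup da kv.1 ≠ "")).map (fun kv => (kv.2, pvLookup da kv.1)) := by
  fun_induction pvJoinMerge ma da with
  | case1 da => simp
  | case2 x xs => simp [pvLookup]
  | case3 x xs y ys h ih =>
    have hfind : (y :: ys).find? (fun p => p.1 == x.1) = none := by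
      rw [List.find?_eq_none]
      intro p hp hpe
      have hkey : p.1 = x.1 := by simpa using hpe
      rcases List.mem_cons.mp hp with rfl | hm
      · exact absurd (hkey ▸ h) (lt_irrefl _)
      · exact absurd (hkey ▸ (h.trans ((List.pairwise_cons.mp hda).1 p hm))) (lt_irrefl _)
    have hpx : pvLookup (y :: ys) x.1 = "" := by simp [pvLookup, hfind]
    rw [ih ((List.pairwise_cons.mp hma).2) hda, List.filter_cons_of_neg (by simp [hpx])]
  | case4 x xs y ys h1 h2 ih =>
    have hlk : ∀ z ∈ x :: xs, pvLookup (y :: ys) z.1 = pvLookup ys z.1 := by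
      intro z hz
      refine pvLookup_cons_of_ne ?_
      rcases List.mem_cons.mp hz with rfl | hm
      · exact fun he => absurd (he ▸ h2) (lt_irrefl _)
      · exact fun he => absurd (he ▸ (h2.trans ((List.pairwise_cons.mp hma).1 z hm))) (lt_irrefl _)
    rw [ih hma ((List.pairwise_cons.mp hda).2)]
    have hfil : (x :: xs).filter (fun kv => decide (pvLookup (y :: ys) kv.1 ≠ ""))
        = (x :: xs).filter (fun kv => decide (pvLookup ys kv.1 ≠ "")) :=
      List.filter_congr (fun z hz => by rw [hlk z hz])
    rw [hfil]
    exact List.map_congr_left (fun z hz => by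
      rw [hlk z (List.mem_of_mem_filter hz)])
  | case5 x xs y ys h1 h2 ih =>
    have hxy : x.1 = y.1 := by
      have := le_antisymm (le_of_not_gt h2) (le_of_not_gt h1)
      exact congrArg ofLex this
    have hself : pvLookup (y :: ys) x.1 = y.2 := by
      simp [pvLookup, hxy]
    have htail : ∀ z ∈ xs, pvLookup (y :: ys) z.1 = pvLookup ys z.1 := by
      intro z hz
      refine pvLookup_cons_of_ne ?_
      intro he
      have := (List.pairwise_cons.mp hma).1 z hz
      rw [hxy, he] at this
      exact absurd this (lt_irrefl _)
    rw [ih ((List.pairwise_cons.mp hma).2) ((List.pairwise_cons.mp hda).2)]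
    have hfil : xs.filter (fun kv => decide (pvLookup (y :: ys) kv.1 ≠ ""))
        = xs.filter (fun kv => decide (pvLookup ys kv.1 ≠ "")) :=
      List.filter_congr (fun z hz => by rw [htail z hz])
    have hmap : ∀ l : List ((String × String) × String), (∀ z ∈ l, z ∈ xs) →
        l.map (fun kv => (kv.2, pvLookup ys kv.1))
          = l.map (fun kv => (kv.2, pvLookup (y :: ys) kv.1)) := by
      intro l hl
      exact List.map_congr_left (fun z hz => by rw [htail z (hl z hz)])
    rw [List.filter_cons]
    have hcond : (decide (pvLookup (y :: ys) x.1 ≠ "")) = decide (y.2 ≠ "") := by rw [hself]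
    rw [hcond]
    by_cases hy : y.2 = ""
    · simp only [hy, ne_eq, not_true_eq_false, decide_false, Bool.false_eq_true, if_false,
        List.nil_append]
      rw [hfil]
      exact hmap _ (fun z hz => List.mem_of_mem_filter hz)
    · simp only [hy, ne_eq, not_false_eq_true, decide_true, if_true,
        List.singleton_append, List.map_cons, hself]
      rw [hfil]
      exact congrArg₂ List.cons rfl (hmap _ (fun z hz => List.mem_of_mem_filter hz))

-- merge intersection of two strictly sorted lists = filter of the left by membership in the right
lemma pvInterMerge_eq (a b : List String)
    (ha : a.Pairwise (· < ·)) (hb : b.Pairwise (· < ·)) :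
    pvInterMerge a b = a.filter (fun x => b.contains x) := by
  fun_induction pvInterMerge a b with
  | case1 b => simp
  | case2 x xs => simp
  | case3 x xs y ys h ih =>
    have hx : ¬(x = y ∨ x ∈ ys) := by
      rintro (rfl | hm)
      · exact lt_irrefl x h
      · exact lt_irrefl x (h.trans ((List.pairwise_cons.mp hb).1 x hm))
    rw [ih ((List.pairwise_cons.mp ha).2) hb,
        List.filter_cons_of_neg (by simpa using hx)]
  | case4 x xs y ys h1 h2 ih =>
    rw [ih ha ((List.pairwise_cons.mp hb).2)]
    apply List.filter_congr
    intro z hz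
    have hzy : z ≠ y := by
      rcases List.mem_cons.mp hz with rfl | hm
      · exact (ne_of_lt h2).symm
      · exact (ne_of_lt (h2.trans ((List.pairwise_cons.mp ha).1 z hm))).symm
    simp [hzy]
  | case5 x xs y ys h1 h2 ih =>
    have hxy : x = y := le_antisymm (le_of_not_gt h2) (le_of_not_gt h1)
    subst hxy
    rw [ih ((List.pairwise_cons.mp ha).2) ((List.pairwise_cons.mp hb).2)]
    have hrest : xs.filter (fun z => (x :: ys).contains z) = xs.filter (fun z => ys.contains z) := by
      apply List.filter_congr
      intro z hz
      have hzx : z ≠ x := ((List.pairwise_cons.mp ha).1 z hz).ne'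
      simp [hzx]
    have hpx : (fun z => (x :: ys).contains z) x = true := by simp
    rw [List.filter_cons_of_pos hpx, hrest]

-- the tif_links list of A, closed form (before sorting)
lemma tif_list_A (m d : PySem.Dict (String × String) String) :
    m.items.foldl (fun acc kv =>
        match d.get? kv.1 with
        | some der => if der ≠ "" then acc ++ [(kv.2, der)] else acc
        | none => acc) []
    = (m.items.filter (fun kv => pvLookup d.items kv.1 ≠ "")).map
        (fun kv => (kv.2, pvLookup d.items kv.1)) := by
  have hbody : (fun (acc : List (String × String)) (kv : (String × String) × String) =>
      match d.get? kv.1 with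
      | some der => if der ≠ "" then acc ++ [(kv.2, der)] else acc
      | none => acc)
      = fun acc kv => if (decide (pvLookup d.items kv.1 ≠ "")) = true
          then acc ++ [(kv.2, pvLookup d.items kv.1)] else acc := by
    funext acc kv
    have he : (d.items.find? (fun p => p.1 == kv.1)).map (·.2) = d.get? kv.1 := rfl
    rcases hg : d.get? kv.1 with _ | der <;> simp [pvLookup, he, hg]
  rw [hbody, PySem.List.foldl_append_if _ _ m.items [], List.nil_append]

-- A's loop over vols, split into its two independent accumulators
lemma vols_loop_eq (mc dc te : List String) (vols : List String)
    (a b : List (String × String)) :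
    vols.foldl (fun (acc : List (String × String) × List (String × String)) vol =>
      (if mc.contains vol && te.contains vol then
         acc.1 ++ [(pvUriMasters vol, pvUriTei vol)] else acc.1,
       if te.contains vol then
         (let t1 := if mc.contains vol then
             acc.2 ++ [(pvUriTei vol, pvUriMasters vol)] else acc.2
          if dc.contains vol then
            t1 ++ [(pvUriTei vol, pvUriDerivates vol)] else t1)
       else acc.2)) (a, b)
    = (a ++ (vols.filter (fun v => mc.contains v && te.contains v)).map
          (fun v => (pvUriMasters v, pvUriTei v)),
       b ++ vols.flatMap (fun v =>
         (if te.contains v && mc.contains v then [(pvUriTei v, pvUriMasters v)] else []) ++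
         (if te.contains v && dc.contains v then [(pvUriTei v, pvUriDerivates v)] else []))) := by
  induction vols generalizing a b with
  | nil => simp
  | cons v t ih =>
    rw [List.foldl_cons, ih]
    by_cases h1 : v ∈ mc <;> by_cases h2 : v ∈ te <;>
      by_cases h3 : v ∈ dc <;>
        simp [h1, h2, h3, List.append_assoc]

-- an interleaving flatMap splits, up to permutation
lemma flatMap_pair_perm {α β : Type} (g1 g2 : α → List β) (l : List α) :
    (l.flatMap (fun v => g1 v ++ g2 v)).Perm (l.flatMap g1 ++ l.flatMap g2) := by
  induction l with
  | nil => simp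
  | cons a t ih =>
    simp only [List.flatMap_cons]
    refine (List.Perm.append_left (g1 a ++ g2 a) ih).trans ?_
    simp only [List.append_assoc]
    exact List.Perm.append_left _ (List.perm_append_comm_assoc _ _ _)

lemma flatMap_if_singleton {α β : Type} (p : α → Bool) (f : α → β) (l : List α) :
    l.flatMap (fun v => if p v then [f v] else []) = (l.filter p).map f := by
  induction l with
  | nil => rfl
  | cons a t ih => cases hp : p a <;> simp [hp, ih]

lemma nodup_vols (mc dc te : List String) :
    (PySem.List.sorted
      (PySem.Set.union (PySem.Set.union (PySem.Set.ofList te) mc) dc) (fun x => x)).Nodup := by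
  have hbase : (PySem.Set.union (PySem.Set.union (PySem.Set.ofList te) mc) dc).Nodup :=
    PySem.Set.nodup_union _ _ (PySem.Set.nodup_union _ _ (PySem.Set.nodup_ofList te))
  exact ((PySem.List.sorted_perm _ _ _).nodup_iff).mpr hbase

lemma mem_vols (mc dc te : List String) (v : String) :
    v ∈ PySem.List.sorted
      (PySem.Set.union (PySem.Set.union (PySem.Set.ofList te) mc) dc) (fun x => x)
    ↔ v ∈ te ∨ v ∈ mc ∨ v ∈ dc := by
  rw [PySem.List.mem_sorted, PySem.Set.mem_union, PySem.Set.mem_union, PySem.Set.mem_ofList]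
  tauto

-- strict key-sortedness of the key-sorted item list of a dict with nodup keys
lemma sorted_items_pairwise (d : PySem.Dict (String × String) String) (hnd : d.keys.Nodup) :
    (PySem.List.sorted d.items (fun kv => toLex kv.1)).Pairwise
      (fun u v => toLex u.1 < toLex v.1) := by
  apply pairwise_lt_of_le_nodup (PySem.List.sorted_pairwise d.items (fun kv => toLex kv.1))
  refine (((PySem.List.sorted_perm d.items (fun kv => toLex kv.1) false).map _).nodup_iff).mpr ?_
  have he : d.items.map (fun kv => toLex kv.1)
      = (d.items.map Prod.fst).map (fun k => toLex k) := by
    rw [List.map_map]; rfl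
  rw [he]
  exact (show (d.items.map Prod.fst).Nodup by simpa [PySem.Dict.keys] using hnd).map
    (toLex.injective)

-- ===== VERDICT (by name: the statement is the Claim_ definition above) =====
theorem build_triples_spec : Claim_equal_build_triples := by
  unfold Claim_equal_build_triples
  intro mt dt mc dc te _
  unfold Spec_build_triples
  simp only [build_triples, build_triples_alt]
  rw [vols_loop_eq, tif_list_A]
  have hvnd := nodup_vols mc dc te
  have hvmem := mem_vols mc dc te
  refine Prod.ext ?_ (Prod.ext ?_ ?_)
  · -- tif_links
    rw [pvJoinMerge_eq _ _
        (sorted_items_pairwise _ (nodup_keys_pvDict mt))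
        (sorted_items_pairwise _ (nodup_keys_pvDict dt))]
    have hdand : ((PySem.List.sorted (pvDict dt).items (fun kv => toLex kv.1)).map Prod.fst).Nodup :=
      (((PySem.List.sorted_perm (pvDict dt).items (fun kv => toLex kv.1) false).map _).nodup_iff).mpr
        (by simpa [PySem.Dict.keys] using nodup_keys_pvDict dt)
    have hld : ∀ k, pvLookup (PySem.List.sorted (pvDict dt).items (fun kv => toLex kv.1)) k
        = pvLookup (pvDict dt).items k :=
      fun k => pvLookup_perm (PySem.List.sorted_perm _ _ _) hdand k
    have hpf : (fun (kv : (String × String) × String) =>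
          decide (pvLookup (PySem.List.sorted (pvDict dt).items (fun kv => toLex kv.1)) kv.1 ≠ ""))
        = fun kv => decide (pvLookup (pvDict dt).items kv.1 ≠ "") := by
      funext kv; rw [hld]
    have hpg : (fun (kv : (String × String) × String) =>
          (kv.2, pvLookup (PySem.List.sorted (pvDict dt).items (fun kv => toLex kv.1)) kv.1))
        = fun kv => (kv.2, pvLookup (pvDict dt).items kv.1) := by
      funext kv; rw [hld]
    rw [hpf, hpg]
    exact pvSort_perm_eq
      ((((PySem.List.sorted_perm (pvDict mt).items (fun kv => toLex kv.1) false).filter _).map _).symm)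
  · -- col_to_tei
    simp only [List.nil_append]
    rw [pvInterMerge_eq _ _
        (PySem.List.sorted_ofList_pairwise_lt mc) (PySem.List.sorted_ofList_pairwise_lt te)]
    apply pvSort_perm_eq
    apply List.Perm.map
    refine ((List.perm_ext_iff_of_nodup (nodup_vols mc dc te |>.filter _) ?_).mpr ?_)
    · exact ((PySem.List.sorted_perm (PySem.Set.ofList mc) (fun x => x) false).nodup_iff.mpr
        (PySem.Set.nodup_ofList mc)).filter _
    · intro v
      rw [List.mem_filter, List.mem_filter, mem_vols, PySem.List.mem_sorted, PySem.Set.mem_ofList]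
      simp only [Bool.and_eq_true, List.contains_iff_mem, PySem.List.mem_sorted,
        PySem.Set.mem_ofList]
      tauto
  · -- tei_to_cols
    simp only [List.nil_append]
    rw [pvInterMerge_eq _ _
        (PySem.List.sorted_ofList_pairwise_lt te) (PySem.List.sorted_ofList_pairwise_lt mc),
      pvInterMerge_eq _ _
        (PySem.List.sorted_ofList_pairwise_lt te) (PySem.List.sorted_ofList_pairwise_lt dc)]
    apply pvSort_perm_eq
    refine (flatMap_pair_perm _ _ _).trans ?_
    rw [flatMap_if_singleton, flatMap_if_singleton]
    apply List.Perm.append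
    · apply List.Perm.map
      refine ((List.perm_ext_iff_of_nodup (nodup_vols mc dc te |>.filter _) ?_).mpr ?_)
      · exact ((PySem.List.sorted_perm (PySem.Set.ofList te) (fun x => x) false).nodup_iff.mpr
          (PySem.Set.nodup_ofList te)).filter _
      · intro v
        rw [List.mem_filter, List.mem_filter, mem_vols, PySem.List.mem_sorted, PySem.Set.mem_ofList]
        simp only [Bool.and_eq_true, List.contains_iff_mem, PySem.List.mem_sorted,
          PySem.Set.mem_ofList]
        tauto
    · apply List.Perm.map
      refine ((List.perm_ext_iff_of_nodup (nodup_vols mc dc te |>.filter _) ?_).mpr ?_)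
      · exact ((PySem.List.sorted_perm (PySem.Set.ofList te) (fun x => x) false).nodup_iff.mpr
          (PySem.Set.nodup_ofList te)).filter _
      · intro v
        rw [List.mem_filter, List.mem_filter, mem_vols, PySem.List.mem_sorted, PySem.Set.mem_ofList]
        simp only [Bool.and_eq_true, List.contains_iff_mem, PySem.List.mem_sorted,
          PySem.Set.mem_ofList]
        tauto
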